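-- pv_equiv track=rewrite | github.com/iclr2025-code/natural_perturbations | natural perturbation pipeline/candidate_passage_pairs_curation.py | group_items_with_distance_one
-- ===== SOURCE A (Python) =====
-- def group_items_with_distance_one(lst):
--     result = []
--     current_group = [lst[0]]
--
--     for i in range(1, len(lst)):
--         if abs(lst[i] - lst[i - 1]) == 1:
--             current_group.append(lst[i])
--         else:
--             result.append(current_group)
--             current_group = [lst[i]]
--
--     result.append(current_group)
--
--     return result
-- ===== SOURCE B (Python) =====
-- def group_items_with_distance_one(lst):
--     breaks = [i for i in range(1, len(lst)) if abs(lst[i] - lst[i - 1]) != 1]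
--     bounds = [0] + breaks + [len(lst)]
--     return [lst[a:b] for a, b in zip(bounds, bounds[1:])]
-- ===== Notes on version B (the rewrite author's own statement) =====
-- stated objective: alternative
-- what changed: Replaces the single accumulating pass (growing a current_group and flushing it into result) with a boundary-based two-phase computation: first collect the break indices where consecutive elements do not differ by 1, then slice the list between consecutive boundaries.
-- outside the precondition, e.g. on group_items_with_distance_one([]): A raises IndexError, B returns [[]]
import Mathlib
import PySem

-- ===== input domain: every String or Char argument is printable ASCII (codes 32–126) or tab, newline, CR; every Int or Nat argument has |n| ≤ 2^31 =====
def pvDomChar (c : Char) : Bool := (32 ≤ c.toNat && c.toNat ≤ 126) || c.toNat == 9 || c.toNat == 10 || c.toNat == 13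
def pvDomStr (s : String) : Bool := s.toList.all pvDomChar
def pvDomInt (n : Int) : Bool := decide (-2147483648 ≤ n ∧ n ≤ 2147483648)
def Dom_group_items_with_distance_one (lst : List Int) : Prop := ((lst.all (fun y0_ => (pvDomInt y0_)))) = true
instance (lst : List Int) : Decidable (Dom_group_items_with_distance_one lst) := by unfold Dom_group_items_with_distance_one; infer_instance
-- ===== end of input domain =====

-- B replaces A's single accumulating pass by a boundary-based computation (break indices, then slices);
-- equal cost, different decomposition (objective: alternative).

-- ===== PORT A =====
def group_items_with_distance_one (lst : List Int) : List (List Int) :=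
  match lst with
  | [] => []  -- lst[0] raises IndexError; excluded by Pre_
  | x0 :: _ =>
    let st := (PySem.List.pyRange 1 lst.length 1).foldl
      (fun (st : List (List Int) × List Int) i =>
        if (PySem.List.pyGetD lst i 0 - PySem.List.pyGetD lst (i - 1) 0).natAbs = 1 then
          (st.1, st.2 ++ [PySem.List.pyGetD lst i 0])
        else
          (st.1 ++ [st.2], [PySem.List.pyGetD lst i 0]))
      ([], [x0])
    st.1 ++ [st.2]

-- ===== PORT B =====
def group_items_with_distance_one_alt (lst : List Int) : List (List Int) :=
  let breaks := (PySem.List.pyRange 1 lst.length 1).filter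
    (fun i => ¬ (PySem.List.pyGetD lst i 0 - PySem.List.pyGetD lst (i - 1) 0).natAbs = 1)
  let bounds := 0 :: breaks ++ [(lst.length : Int)]
  (bounds.zip bounds.tail).map (fun ab => PySem.List.slice lst (some ab.1) (some ab.2))

-- ===== PRECONDITION & SPEC =====
-- Pre_ excludes only the empty list, on which A raises IndexError (lst[0]).
def Pre_group_items_with_distance_one (lst : List Int) : Prop := lst ≠ []
instance (lst : List Int) : Decidable (Pre_group_items_with_distance_one lst) := by unfold Pre_group_items_with_distance_one; infer_instance
def pvWitness_group_items_with_distance_one : List Int := [1, 2, 5]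

def Spec_group_items_with_distance_one (lst : List Int) (out : List (List Int)) : Prop := out = group_items_with_distance_one_alt lst
instance (lst : List Int) (out : List (List Int)) : Decidable (Spec_group_items_with_distance_one lst out) := by unfold Spec_group_items_with_distance_one; infer_instance

-- ===== CLAIM (what is proved, stated in full; the proofs are below) =====
def Claim_equal_group_items_with_distance_one : Prop := ∀ (lst : List Int), Dom_group_items_with_distance_one lst → Pre_group_items_with_distance_one lst → Spec_group_items_with_distance_one lst (group_items_with_distance_one lst)

-- ===== LEMMAS AND PROOFS =====

-- A's fold state after processing indices 1..n
def pvStA (lst : List Int) (x0 : Int) (n : Int) : List (List Int) × List Int :=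
  (PySem.List.pyRange 1 n 1).foldl
    (fun (st : List (List Int) × List Int) i =>
      if (PySem.List.pyGetD lst i 0 - PySem.List.pyGetD lst (i - 1) 0).natAbs = 1 then
        (st.1, st.2 ++ [PySem.List.pyGetD lst i 0])
      else
        (st.1 ++ [st.2], [PySem.List.pyGetD lst i 0]))
    ([], [x0])

-- B's break indices restricted to 1..n
def pvBrk (lst : List Int) (n : Int) : List Int :=
  (PySem.List.pyRange 1 n 1).filter
    (fun i => ¬ (PySem.List.pyGetD lst i 0 - PySem.List.pyGetD lst (i - 1) 0).natAbs = 1)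

-- slices between consecutive bounds
def pvSlices (lst : List Int) (bs : List Int) : List (List Int) :=
  (bs.zip bs.tail).map (fun ab => PySem.List.slice lst (some ab.1) (some ab.2))

theorem pvSlices_snoc (lst : List Int) (b0 : Int) (bs : List Int) (n : Int) :
    pvSlices lst ((b0 :: bs) ++ [n]) =
      pvSlices lst (b0 :: bs) ++ [PySem.List.slice lst (some ((b0 :: bs).getLastD 0)) (some n)] := by
  induction bs generalizing b0 with
  | nil => simp [pvSlices]
  | cons b1 t ih =>
    have := ih b1
    simp [pvSlices] at this ⊢
    exact this

theorem pvBrk_mem (lst : List Int) (n : Int) (x : Int) (hx : x ∈ pvBrk lst n) : 1 ≤ x ∧ x < n := by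
  unfold pvBrk at hx
  have := List.mem_of_mem_filter hx
  exact (PySem.List.mem_pyRange_one).1 this

theorem pvLastB_range (lst : List Int) (n : Int) :
    0 ≤ (0 :: pvBrk lst n).getLastD 0 ∧ ((0 :: pvBrk lst n).getLastD 0 < n ∨ (0 :: pvBrk lst n).getLastD 0 = 0) := by
  have hmem : (0 :: pvBrk lst n).getLastD 0 ∈ (0 : Int) :: pvBrk lst n := by
    rw [List.getLastD_cons]; exact List.getLastD_mem_cons
  rcases List.mem_cons.1 hmem with h | h
  · rw [h]; exact ⟨le_refl 0, Or.inr rfl⟩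
  · rcases pvBrk_mem lst n _ h with ⟨h1, h2⟩
    exact ⟨by omega, Or.inl h2⟩

-- slice with natural bounds a ≤ b ≤ len extends by one element
theorem pvSlice_extend (lst : List Int) (a b : Nat) (hab : a ≤ b) (hb : b < lst.length) :
    PySem.List.slice lst (some (a : Int)) (some (b : Int)) ++ [lst.getD b 0] =
      PySem.List.slice lst (some (a : Int)) (some ((b : Int) + 1)) := by
  have h1 : ((b : Int) + 1) = ((b + 1 : Nat) : Int) := by push_cast; ring
  rw [h1, PySem.List.slice_natCast, PySem.List.slice_natCast]
  have h2 : b + 1 - a = (b - a) + 1 := by omega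
  rw [h2, List.take_add_one]
  have h3 : (lst.drop a)[b - a]? = some lst[b] := by
    rw [List.getElem?_drop]
    have : a + (b - a) = b := by omega
    rw [this]
    exact List.getElem?_eq_getElem hb
  simp [h3, List.getD_eq_getElem?_getD, List.getElem?_eq_getElem hb]

theorem pvSlice_single (lst : List Int) (b : Nat) (hb : b < lst.length) :
    PySem.List.slice lst (some (b : Int)) (some ((b : Int) + 1)) = [lst.getD b 0] := by
  have h1 : ((b : Int) + 1) = ((b + 1 : Nat) : Int) := by push_cast; ring
  rw [h1, PySem.List.slice_natCast]
  have h2 : b + 1 - b = 1 := by omega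
  rw [h2]
  rw [List.take_one]
  rw [List.head?_drop]
  simp [List.getD_eq_getElem?_getD, List.getElem?_eq_getElem hb]

-- the main invariant: after processing 1..(1+k), A's state is (slices between bounds so far, slice from the last bound)
theorem pvInvariant (lst : List Int) (x0 : Int) (rest : List Int) (hl : lst = x0 :: rest)
    (k : Nat) (hk : 1 + k ≤ lst.length) :
    pvStA lst x0 ((1 + k : Nat) : Int) =
      (pvSlices lst (0 :: pvBrk lst ((1 + k : Nat) : Int)),
       PySem.List.slice lst (some ((0 :: pvBrk lst ((1 + k : Nat) : Int)).getLastD 0)) (some ((1 + k : Nat) : Int))) := by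
  induction k with
  | zero =>
    have h1 : ((1 + 0 : Nat) : Int) = 1 := by norm_num
    rw [h1]
    have h2 : PySem.List.pyRange 1 1 1 = [] := PySem.List.pyRange_one_eq_nil (le_refl 1)
    have h3 : PySem.List.slice lst (some ((0:Int))) (some (1:Int)) = [x0] := by
      have := pvSlice_single lst 0 (by simp [hl])
      simpa [hl] using this
    simp [pvStA, pvBrk, pvSlices, h2, h3]
  | succ k ih =>
    have hk' : 1 + k ≤ lst.length := by omega
    have hlt : 1 + k < lst.length := by omega
    have ih' := ih hk'
    have hsplit : PySem.List.pyRange 1 ((1 + (k+1) : Nat) : Int) 1 =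
        PySem.List.pyRange 1 ((1 + k : Nat) : Int) 1 ++ [((1 + k : Nat) : Int)] := by
      have : ((1 + (k+1) : Nat) : Int) = ((1 + k : Nat) : Int) + 1 := by push_cast; ring
      rw [this]
      exact PySem.List.pyRange_one_succ_right (by push_cast; omega)
    have hgd : PySem.List.pyGetD lst ((1 + k : Nat) : Int) 0 = lst.getD (1 + k) 0 := by
      rw [PySem.List.pyGetD_natCast]
    by_cases hc : (PySem.List.pyGetD lst (1 + (k : Int)) 0 - lst[k]?.getD 0).natAbs = 1
    · -- continuation: same group extended
      have hbrk : pvBrk lst ((1 + (k+1) : Nat) : Int) = pvBrk lst ((1 + k : Nat) : Int) := by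
        unfold pvBrk
        rw [hsplit, List.filter_append]
        simp [hc]
      have hstA : pvStA lst x0 ((1 + (k+1) : Nat) : Int) =
          ((pvStA lst x0 ((1 + k : Nat) : Int)).1,
           (pvStA lst x0 ((1 + k : Nat) : Int)).2 ++ [PySem.List.pyGetD lst ((1 + k : Nat) : Int) 0]) := by
        unfold pvStA
        rw [hsplit, List.foldl_append]
        simp [hc]
      rw [hstA, ih', hbrk]
      have hlast := pvLastB_range lst ((1 + k : Nat) : Int)
      set L := (0 :: pvBrk lst ((1 + k : Nat) : Int)).getLastD 0 with hL
      have hL0 : 0 ≤ L := hlast.1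
      have hLlt : L ≤ ((1 + k : Nat) : Int) := by
        rcases hlast.2 with h | h
        · omega
        · rw [h]; push_cast; omega
      obtain ⟨a, ha⟩ : ∃ a : Nat, L = (a : Int) := ⟨L.toNat, (Int.toNat_of_nonneg hL0).symm⟩
      have hext := pvSlice_extend lst a (1 + k) (by omega) hlt
      have hcast : ((1 + (k+1) : Nat) : Int) = ((1 + k : Nat) : Int) + 1 := by push_cast; ring
      simp only [ha, hgd, hcast]
      rw [hext]
    · -- break: start a new group at index 1+k
      have hbrk : pvBrk lst ((1 + (k+1) : Nat) : Int) = pvBrk lst ((1 + k : Nat) : Int) ++ [((1 + k : Nat) : Int)] := by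
        unfold pvBrk
        rw [hsplit, List.filter_append]
        simp [hc]
      have hstA : pvStA lst x0 ((1 + (k+1) : Nat) : Int) =
          ((pvStA lst x0 ((1 + k : Nat) : Int)).1 ++ [(pvStA lst x0 ((1 + k : Nat) : Int)).2],
           [PySem.List.pyGetD lst ((1 + k : Nat) : Int) 0]) := by
        unfold pvStA
        rw [hsplit, List.foldl_append]
        simp [hc]
      rw [hstA, ih', hbrk]
      have hsnoc := pvSlices_snoc lst 0 (pvBrk lst ((1 + k : Nat) : Int)) ((1 + k : Nat) : Int)
      have hcast : ((1 + (k+1) : Nat) : Int) = ((1 + k : Nat) : Int) + 1 := by push_cast; ring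
      have hsingle := pvSlice_single lst (1 + k) hlt
      have hlastnew : ((0 : Int) :: (pvBrk lst ((1 + k : Nat) : Int) ++ [((1 + k : Nat) : Int)])).getLastD 0 = ((1 + k : Nat) : Int) := by
        rw [show (0:Int) :: (pvBrk lst ((1 + k : Nat) : Int) ++ [((1 + k : Nat) : Int)]) = ((0:Int) :: pvBrk lst ((1 + k : Nat) : Int)) ++ [((1 + k : Nat) : Int)] from rfl, List.getLastD_concat]
      rw [List.cons_append] at hsnoc
      rw [hsnoc, hlastnew, hcast, hsingle, hgd]

-- ===== VERDICT (by name: the statement is the Claim_ definition above) =====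
theorem group_items_with_distance_one_spec : Claim_equal_group_items_with_distance_one := by
  intro lst _ hpre
  unfold Spec_group_items_with_distance_one
  match hl : lst with
  | [] =>
    unfold Pre_group_items_with_distance_one at hpre
    exact absurd rfl hpre
  | x0 :: rest =>
    have hlen : 1 ≤ (x0 :: rest).length := by simp
    obtain ⟨k, hk⟩ : ∃ k : Nat, (x0 :: rest).length = 1 + k := ⟨(x0 :: rest).length - 1, by omega⟩
    have hinv := pvInvariant (x0 :: rest) x0 rest rfl k (by omega)
    have hA : group_items_with_distance_one (x0 :: rest) =
        (pvStA (x0 :: rest) x0 (((x0 :: rest).length : Nat) : Int)).1 ++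
        [(pvStA (x0 :: rest) x0 (((x0 :: rest).length : Nat) : Int)).2] := by
      simp [group_items_with_distance_one, pvStA]
    have hB : group_items_with_distance_one_alt (x0 :: rest) =
        pvSlices (x0 :: rest) (0 :: pvBrk (x0 :: rest) (((x0 :: rest).length : Nat) : Int) ++ [((x0 :: rest).length : Int)]) := by
      simp [group_items_with_distance_one_alt, pvBrk, pvSlices]
    rw [hA, hB, hk]
    rw [hinv]
    have hsnoc := pvSlices_snoc (x0 :: rest) 0 (pvBrk (x0 :: rest) ((1 + k : Nat) : Int)) ((1 + k : Nat) : Int)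
    rw [List.cons_append] at hsnoc
    exact hsnoc.symm
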